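-- pv_equiv track=rewrite | github.com/ddobokki/coding-test-practice | 프로그래머스/탐욕법/42860.py | number_of_horizontal
-- ===== SOURCE A (Python) =====
-- def number_of_horizontal(name):
--     idx = 0
--     name_li = list(name)
--     num = 0
--     name_li[idx] = 'A'
--     while True:
--
--         for i in range(1,len(name_li)):
--             if(name_li[idx + i] != 'A'):
--                 name_li[idx + i] = 'A'
--                 num += i
--                 idx = idx + i
--                 break
--             if(name_li[idx - i] != 'A'):
--                 name_li[idx - i] = 'A'
--                 num += i
--                 idx = idx - i
--                 break
--
--         if(all(list(map(lambda x:x == 'A',name_li)))):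
--             break
--     return num
-- ===== SOURCE B (Python) =====
-- def number_of_horizontal(name):
--     # two-pointer sweep over the sorted non-'A' positions (circular greedy, forward tie)
--     n = len(name)
--     pos = [i for i in range(1, n) if name[i] != 'A']
--     num = 0
--     idx = 0
--     f, b = 0, len(pos) - 1
--     while f <= b:
--         df = pos[f] - idx
--         db = idx - (pos[b] - n)
--         if df <= db:
--             num += df
--             idx = pos[f]
--             f += 1
--         else:
--             num += db
--             idx = pos[b] - n
--             b -= 1
--     return num
-- ===== Notes on version B (the rewrite author's own statement) =====
-- stated objective: faster
-- what changed: A repeatedly rescans the char array outward from the cursor (and rescans the whole array for the all-done test) on every greedy step; B precomputes the sorted list of positions still to visit once and consumes it with two pointers, so each greedy step (nearest circular target, forward on ties) is O(1).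
-- crash fix: On the empty string A raises IndexError (assignment to the first list cell of an empty list); B returns 0. — e.g. on number_of_horizontal(""): A raises IndexError, B returns 0
import Mathlib
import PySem

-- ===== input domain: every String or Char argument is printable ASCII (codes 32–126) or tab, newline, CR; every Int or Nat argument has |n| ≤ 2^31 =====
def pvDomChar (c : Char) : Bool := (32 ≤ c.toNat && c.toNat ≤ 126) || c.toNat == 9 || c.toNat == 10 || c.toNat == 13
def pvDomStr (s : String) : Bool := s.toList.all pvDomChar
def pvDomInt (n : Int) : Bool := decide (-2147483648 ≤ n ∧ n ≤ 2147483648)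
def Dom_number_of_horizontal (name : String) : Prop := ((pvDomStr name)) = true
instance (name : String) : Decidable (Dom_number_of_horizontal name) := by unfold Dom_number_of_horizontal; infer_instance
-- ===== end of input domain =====

-- B replaces A's quadratic outward rescans of the char array by a one-pass two-pointer
-- sweep over the precomputed sorted list of non-'A' positions (faster, asymptotic).


-- ===== PORT A =====
-- inner `for i in range(1, len(name_li))` loop: returns some (new list, new num, new idx)
-- on `break`; none when the range is exhausted (or the forward access name_li[idx+i]
-- would raise IndexError in Python — proved unreachable for every nonempty name).
def nohScan (li : List Char) (idx num : Int) : Nat → Int → Option (List Char × Int × Int)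
  | 0, _ => none
  | fuel + 1, i =>
    match PySem.List.pyGet? li (idx + i) with
    | none => none
    | some c =>
      if c ≠ 'A' then
        match PySem.List.pySet? li (idx + i) 'A' with
        | none => none
        | some li' => some (li', num + i, idx + i)
      else
        match PySem.List.pyGet? li (idx - i) with
        | none => none
        | some c' =>
          if c' ≠ 'A' then
            match PySem.List.pySet? li (idx - i) 'A' with
            | none => none
            | some li' => some (li', num + i, idx - i)
          else nohScan li idx num fuel (i + 1)

-- the `while True` loop; fuel bounds the number of iterations (≤ number of non-'A'
-- chars + 1 ≤ length, proved where it is used).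
def nohLoop : Nat → List Char → Int → Int → Int
  | 0, _, _, num => num
  | fuel + 1, li, idx, num =>
    match nohScan li idx num (li.length - 1) 1 with
    | some (li', num', idx') =>
      if li'.all (fun x => x == 'A') then num' else nohLoop fuel li' idx' num'
    | none =>
      if li.all (fun x => x == 'A') then num else nohLoop fuel li idx num

def number_of_horizontal (name : String) : Int :=
  let li := name.toList
  match PySem.List.pySet? li 0 'A' with
  | none => 0   -- Python raises IndexError here (empty name); excluded by Pre_
  | some li0 => nohLoop li0.length li0 0 0

-- ===== PORT B =====
-- `while f <= b` two-pointer loop of Source B: the slice pos[f..b] is carried as the list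
-- `mid`; pos[f] is its head, pos[b] its last element.
def nohAltGo (n : Int) : Nat → List Int → Int → Int → Int
  | _, [], _, num => num
  | 0, _ :: _, _, num => num   -- fuel = length of the slice: never reached
  | fuel + 1, q :: rest, idx, num =>
    let B := (q :: rest).getLast (List.cons_ne_nil q rest)
    let df := q - idx
    let db := idx - (B - n)
    if df ≤ db then nohAltGo n fuel rest q (num + df)
    else nohAltGo n fuel (q :: rest).dropLast (B - n) (num + db)

def number_of_horizontal_alt (name : String) : Int :=
  let li := name.toList
  let n : Int := li.length
  let pos := (PySem.List.pyRange 1 n 1).filter (fun i => PySem.List.pyGetD li i 'A' ≠ 'A')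
  nohAltGo n pos.length pos 0 0

-- ===== PRECONDITION & SPEC =====
-- Pre_ excludes only the empty string, on which A raises IndexError (name_li[0] = 'A').
def Pre_number_of_horizontal (name : String) : Prop := name ≠ ""
instance (name : String) : Decidable (Pre_number_of_horizontal name) := by
  unfold Pre_number_of_horizontal; infer_instance

def pvWitness_number_of_horizontal : String := "BANANA"

-- On the empty string A raises IndexError (assignment to the first list cell of an empty list); B returns 0.
def Raises_number_of_horizontal (name : String) : Prop := name = ""
instance (name : String) : Decidable (Raises_number_of_horizontal name) := by
  unfold Raises_number_of_horizontal; infer_instance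
def pvRaiseWitness_number_of_horizontal : String := ""
def pvRaiseWitnessOut_number_of_horizontal : Int := 0

def Spec_number_of_horizontal (name : String) (out : Int) : Prop := out = number_of_horizontal_alt name
instance (name : String) (out : Int) : Decidable (Spec_number_of_horizontal name out) := by
  unfold Spec_number_of_horizontal; infer_instance

-- ===== CLAIM (what is proved, stated in full; the proofs are below) =====
def Claim_equal_number_of_horizontal : Prop := ∀ (name : String), Dom_number_of_horizontal name → Pre_number_of_horizontal name → Spec_number_of_horizontal name (number_of_horizontal name)

def Claim_raises_number_of_horizontal : Prop := (∀ (name : String), Dom_number_of_horizontal name → Raises_number_of_horizontal name → ¬ Pre_number_of_horizontal name) ∧ (Dom_number_of_horizontal (pvRaiseWitness_number_of_horizontal) ∧ Raises_number_of_horizontal (pvRaiseWitness_number_of_horizontal) ∧ number_of_horizontal_alt (pvRaiseWitness_number_of_horizontal) = pvRaiseWitnessOut_number_of_horizontal)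

-- ===== LEMMAS AND PROOFS =====

-- small evaluators for PySem indexing on a known-sign index
theorem pyIdx_pos (n : Nat) (i : Int) (h0 : 0 ≤ i) (h1 : i < (n : Int)) :
    PySem.List.pyIdx? n i = some i.toNat := by
  simp [PySem.List.pyIdx?, h0, h1]

theorem pyIdx_neg (n : Nat) (i : Int) (h0 : i < 0) (h1 : -(n : Int) ≤ i) :
    PySem.List.pyIdx? n i = some (i + n).toNat := by
  simp only [PySem.List.pyIdx?, if_neg (not_le.mpr h0), if_pos h1]
  congr 1
  omega

theorem pyGet_pos {α : Type} (xs : List α) (i : Int) (h0 : 0 ≤ i) (h1 : i < (xs.length : Int)) :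
    PySem.List.pyGet? xs i = some (xs[i.toNat]'(by omega)) := by
  simp [PySem.List.pyGet?, pyIdx_pos xs.length i h0 h1]

theorem pyGet_neg {α : Type} (xs : List α) (i : Int) (h0 : i < 0) (h1 : -(xs.length : Int) ≤ i) :
    PySem.List.pyGet? xs i = some (xs[(i + xs.length).toNat]'(by omega)) := by
  simp [PySem.List.pyGet?, pyIdx_neg xs.length i h0 h1]

theorem pySet_pos {α : Type} (xs : List α) (i : Int) (v : α) (h0 : 0 ≤ i) (h1 : i < (xs.length : Int)) :
    PySem.List.pySet? xs i v = some (xs.set i.toNat v) := by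
  simp [PySem.List.pySet?, pyIdx_pos xs.length i h0 h1]

theorem pySet_neg {α : Type} (xs : List α) (i : Int) (v : α) (h0 : i < 0) (h1 : -(xs.length : Int) ≤ i) :
    PySem.List.pySet? xs i v = some (xs.set (i + xs.length).toNat v) := by
  simp [PySem.List.pySet?, pyIdx_neg xs.length i h0 h1]

theorem pyGet_some_imp {α : Type} (xs : List α) (i : Int) (c : α)
    (h : PySem.List.pyGet? xs i = some c) : ∃ k, ∃ hk : k < xs.length, c = xs[k] := by
  unfold PySem.List.pyGet? PySem.List.pyIdx? at h
  split_ifs at h with h1 h2 h3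
  · simp only [Option.bind_some] at h  -- wrong name fallback below
    exact ⟨i.toNat, by omega, by
      have := List.getElem?_eq_some_iff.mp h
      obtain ⟨hh, rfl⟩ := this
      rfl⟩
  · simp at h
  · simp only [Option.bind_some] at h
    have := List.getElem?_eq_some_iff.mp h
    obtain ⟨hh, rfl⟩ := this
    exact ⟨xs.length - (-i).toNat, hh, rfl⟩
  · simp at h

-- order facts about the sorted slice
theorem pw_head_le {l : List Int} {q : Int} (hpw : l.Pairwise (· < ·)) (hh : l.head? = some q) :
    ∀ x ∈ l, q ≤ x := by
  cases l with
  | nil => simp at hh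
  | cons a t =>
    simp only [List.head?_cons, Option.some.injEq] at hh
    subst hh
    intro x hx
    rcases List.mem_cons.mp hx with rfl | hx
    · exact le_refl x
    · exact le_of_lt ((List.pairwise_cons.mp hpw).1 x hx)

theorem pw_le_last {l : List Int} {B : Int} (hpw : l.Pairwise (· < ·)) (hl : l.getLast? = some B) :
    ∀ x ∈ l, x ≤ B := by
  induction l with
  | nil => simp at hl
  | cons a t ih =>
    cases t with
    | nil =>
      simp only [List.getLast?_singleton, Option.some.injEq] at hl
      subst hl
      intro x hx
      simp only [List.mem_singleton] at hx
      omega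
    | cons b t' =>
      rw [List.getLast?_cons_cons] at hl
      intro x hx
      have hBmem : B ∈ b :: t' := by
        have := List.mem_of_getLast? (l := b :: t') (a := B) hl
        exact this
      rcases List.mem_cons.mp hx with rfl | hx
      · exact le_of_lt ((List.pairwise_cons.mp hpw).1 B hBmem)
      · exact ih (List.pairwise_cons.mp hpw).2 hl x hx

theorem pw_dropLast_concat {l : List Int} {B : Int} (hne : l ≠ [])
    (hl : l.getLast? = some B) : l.dropLast ++ [B] = l := by
  have hcat := List.dropLast_concat_getLast hne
  have hBeq : l.getLast hne = B := by
    have h2 := List.getLast?_eq_some_getLast (l := l) hne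
    rw [h2] at hl
    injection hl
  rw [hBeq] at hcat
  exact hcat

theorem pw_lt_last_of_mem_dropLast {l : List Int} {B : Int}
    (hpw : l.Pairwise (· < ·)) (hl : l.getLast? = some B) : ∀ x ∈ l.dropLast, x < B := by
  intro x hmem
  cases l with
  | nil => simp at hl
  | cons a t =>
    have hne : a :: t ≠ [] := List.cons_ne_nil a t
    have hcat := pw_dropLast_concat hne hl
    have hpw2 : ((a :: t).dropLast ++ [B]).Pairwise (· < ·) := by rw [hcat]; exact hpw
    exact (List.pairwise_append.mp hpw2).2.2 x hmem B (List.mem_singleton_self B)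

-- the loop invariant tying A's mutable char list to B's remaining-positions slice
def nohInv (li : List Char) (mid : List Int) (idx : Int) : Prop :=
  li ≠ [] ∧
  List.Pairwise (· < ·) mid ∧
  (∀ q ∈ mid, 1 ≤ q ∧ q < (li.length : Int)) ∧
  (∀ (j : Nat) (hj : j < li.length), (li[j] ≠ 'A' ↔ (j : Int) ∈ mid)) ∧
  (∀ q ∈ mid.head?, idx < q) ∧
  (∀ q ∈ mid.getLast?, q - (li.length : Int) < idx)

-- positions named by the invariant are genuine list positions
theorem nohInv_elim_pos {li : List Char} {mid : List Int} {q : Int}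
    (hbd : ∀ x ∈ mid, 1 ≤ x ∧ x < (li.length : Int)) (hq : q ∈ mid) :
    q.toNat < li.length ∧ (q.toNat : Int) = q := by
  have := hbd q hq
  omega

theorem allA_iff {li : List Char} {mid : List Int} {idx : Int} (hInv : nohInv li mid idx) :
    (li.all (fun x => x == 'A') = true) ↔ mid = [] := by
  obtain ⟨hne, hpw, hbd, hH, hhd, hlast⟩ := hInv
  constructor
  · intro hall
    cases mid with
    | nil => rfl
    | cons q rest =>
      have hqmem : q ∈ q :: rest := List.mem_cons_self
      obtain ⟨hqlt, hqcast⟩ := nohInv_elim_pos hbd hqmem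
      have hchar : li[q.toNat] ≠ 'A' := (hH q.toNat hqlt).mpr (by rw [hqcast]; exact hqmem)
      have := List.all_eq_true.mp hall li[q.toNat] (List.getElem_mem hqlt)
      exact absurd (by simpa using this) hchar
  · intro h
    subst h
    refine List.all_eq_true.mpr ?_
    intro x hx
    obtain ⟨k, hk, rfl⟩ := List.mem_iff_getElem.mp hx
    have := (hH k hk)
    simp only [List.not_mem_nil, iff_false, not_not] at this
    simp [this]

theorem noh_scan_nil {li : List Char} {idx : Int} (hInv : nohInv li [] idx) (num : Int) :
    ∀ (fuel : Nat) (i : Int), nohScan li idx num fuel i = none := by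
  obtain ⟨hne, hpw, hbd, hH, hhd, hlast⟩ := hInv
  intro fuel
  induction fuel with
  | zero => intro i; rfl
  | succ fuel ih =>
    intro i
    have hA : ∀ (r : Int) (c : Char), PySem.List.pyGet? li r = some c → c = 'A' := by
      intro r c hc
      obtain ⟨k, hk, rfl⟩ := pyGet_some_imp li r _ hc
      have := (hH k hk)
      simp only [List.not_mem_nil, iff_false, not_not] at this
      exact this
    show nohScan li idx num (fuel + 1) i = none
    rw [nohScan]
    cases h1 : PySem.List.pyGet? li (idx + i) with
    | none => rfl
    | some c =>
      have hc := hA _ _ h1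
      subst hc
      simp only [ne_eq, not_true_eq_false, if_false]
      cases h2 : PySem.List.pyGet? li (idx - i) with
      | none => rfl
      | some c' =>
        have hc' := hA _ _ h2
        subst hc'
        simp only [ne_eq, not_true_eq_false, if_false]
        exact ih (i + 1)

theorem noh_scan {li : List Char} {mid : List Int} {q B idx : Int} (num : Int)
    (hInv : nohInv li mid idx) (hq : mid.head? = some q) (hB : mid.getLast? = some B) :
    ∀ (fuel : Nat) (i : Int), i + fuel = (li.length : Int) → 1 ≤ i →
      i ≤ q - idx → i ≤ idx - (B - (li.length : Int)) →
      nohScan li idx num fuel i =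
        if q - idx ≤ idx - (B - (li.length : Int))
        then some (li.set q.toNat 'A', num + (q - idx), q)
        else some (li.set B.toNat 'A', num + (idx - (B - (li.length : Int))), B - (li.length : Int)) := by
  obtain ⟨hne, hpw, hbd, hH, hhd, hlast⟩ := hInv
  have hqmem : q ∈ mid := List.mem_of_mem_head? hq
  have hBmem : B ∈ mid := List.mem_of_getLast? hB
  have hql : 1 ≤ q ∧ q < (li.length : Int) := hbd q hqmem
  have hBl : 1 ≤ B ∧ B < (li.length : Int) := hbd B hBmem
  have hidxq : idx < q := hhd q hq
  have hBidx : B - (li.length : Int) < idx := hlast B hB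
  have hub : ∀ x ∈ mid, q ≤ x ∧ x ≤ B := fun x hx => ⟨pw_head_le hpw hq x hx, pw_le_last hpw hB x hx⟩
  intro fuel
  induction fuel with
  | zero =>
    intro i h0 h1 h2 h3
    omega
  | succ fuel ih =>
    intro i h0 h1 h2 h3
    rw [nohScan]
    by_cases hfw : i = q - idx
    · -- forward break: name_li[idx+i] is the head target
      have hq0 : idx + i = q := by omega
      simp only [hq0, pyGet_pos li q (by omega) hql.2]
      have hcne : li[q.toNat]'(by omega) ≠ 'A' :=
        (hH q.toNat (by omega)).mpr (by rw [(nohInv_elim_pos hbd hqmem).2]; exact hqmem)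
      rw [if_pos hcne]
      simp only [pySet_pos li q 'A' (by omega) hql.2]
      rw [if_pos (by omega : q - idx ≤ idx - (B - (li.length : Int)))]
      have : num + i = num + (q - idx) := by omega
      rw [this]
    · -- i < q - idx : the forward probe hits an 'A'
      have hilt : i < q - idx := by omega
      have hfA : ∀ (c : Char), PySem.List.pyGet? li (idx + i) = some c → c = 'A' := by
        intro c hc
        by_cases hs : 0 ≤ idx + i
        · rw [pyGet_pos li (idx + i) hs (by omega)] at hc
          injection hc with hc
          subst hc
          by_contra hcc
          have hmem := (hH (idx + i).toNat (by omega)).mp hcc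
          have := (hub _ hmem).1
          omega
        · rw [pyGet_neg li (idx + i) (by omega) (by omega)] at hc
          injection hc with hc
          subst hc
          by_contra hcc
          have hmem := (hH (idx + i + (li.length : Int)).toNat (by omega)).mp hcc
          have := (hub _ hmem).2
          omega
      have hfget : PySem.List.pyGet? li (idx + i) = some (if h : 0 ≤ idx + i then li[(idx + i).toNat]'(by omega) else li[(idx + i + (li.length : Int)).toNat]'(by omega)) := by
        by_cases hs : 0 ≤ idx + i
        · rw [pyGet_pos li (idx + i) hs (by omega), dif_pos hs]
        · rw [pyGet_neg li (idx + i) (by omega) (by omega), dif_neg hs]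
      simp only [hfget]
      rw [if_neg (by simpa using hfA _ hfget)]
      by_cases hbw : i = idx - (B - (li.length : Int))
      · -- backward break: name_li[idx-i] is the last target, via negative wraparound
        have hBneg : idx - i = B - (li.length : Int) := by omega
        simp only [hBneg, pyGet_neg li (B - (li.length : Int)) (by omega) (by omega)]
        have hBcast : (B - (li.length : Int) + (li.length : Int)).toNat = B.toNat := by omega
        have hcne : li[(B - (li.length : Int) + (li.length : Int)).toNat]'(by omega) ≠ 'A' := by
          simp only [hBcast]
          exact (hH B.toNat (by omega)).mpr (by rw [(nohInv_elim_pos hbd hBmem).2]; exact hBmem)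
        rw [if_pos hcne]
        simp only [pySet_neg li (B - (li.length : Int)) 'A' (by omega) (by omega)]
        rw [if_neg (by omega : ¬ (q - idx ≤ idx - (B - (li.length : Int))))]
        rw [hBcast]
        have : num + i = num + (idx - (B - (li.length : Int))) := by omega
        rw [this]
      · -- i < db : the backward probe hits an 'A' too; continue the scan
        have hilt' : i < idx - (B - (li.length : Int)) := by omega
        have hbA : ∀ (c : Char), PySem.List.pyGet? li (idx - i) = some c → c = 'A' := by
          intro c hc
          by_cases hs : 0 ≤ idx - i
          · rw [pyGet_pos li (idx - i) hs (by omega)] at hc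
            injection hc with hc
            subst hc
            by_contra hcc
            have hmem := (hH (idx - i).toNat (by omega)).mp hcc
            have := (hub _ hmem).1
            omega
          · rw [pyGet_neg li (idx - i) (by omega) (by omega)] at hc
            injection hc with hc
            subst hc
            by_contra hcc
            have hmem := (hH (idx - i + (li.length : Int)).toNat (by omega)).mp hcc
            have := (hub _ hmem).2
            omega
        have hbget : PySem.List.pyGet? li (idx - i) = some (if h : 0 ≤ idx - i then li[(idx - i).toNat]'(by omega) else li[(idx - i + (li.length : Int)).toNat]'(by omega)) := by
          by_cases hs : 0 ≤ idx - i
          · rw [pyGet_pos li (idx - i) hs (by omega), dif_pos hs]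
          · rw [pyGet_neg li (idx - i) (by omega) (by omega), dif_neg hs]
        simp only [hbget]
        rw [if_neg (by simpa using hbA _ hbget)]
        exact ih (i + 1) (by omega) (by omega) (by omega) (by omega)

theorem inv_forward {li : List Char} {q idx : Int} {rest : List Int}
    (hInv : nohInv li (q :: rest) idx) : nohInv (li.set q.toNat 'A') rest q := by
  obtain ⟨hne, hpw, hbd, hH, hhd, hlast⟩ := hInv
  have hqmem : q ∈ q :: rest := List.mem_cons_self
  obtain ⟨hqlt, hqcast⟩ := nohInv_elim_pos hbd hqmem
  have hpwc := List.pairwise_cons.mp hpw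
  refine ⟨?_, hpwc.2, ?_, ?_, ?_, ?_⟩
  · intro h
    exact hne (by simpa using congrArg List.length h)
  · intro x hx
    have := hbd x (List.mem_cons_of_mem q hx)
    simpa [List.length_set] using this
  · intro j hj
    have hj' : j < li.length := by simpa [List.length_set] using hj
    rw [List.getElem_set]
    by_cases he : q.toNat = j
    · subst he
      simp only [if_pos rfl]
      constructor
      · intro h; exact absurd rfl h
      · intro h
        rw [hqcast] at h
        exact absurd (hpwc.1 q h) (lt_irrefl q)
    · rw [if_neg he]
      rw [hH j hj']
      constructor
      · intro h
        rcases List.mem_cons.mp h with hc | hc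
        · exact absurd (by omega : q.toNat = j) he
        · exact hc
      · exact List.mem_cons_of_mem q
  · intro x hx
    exact hpwc.1 x (List.mem_of_mem_head? hx)
  · intro x hx
    have hx' := List.mem_of_getLast? hx
    have h1 := hbd x (List.mem_cons_of_mem q hx')
    have h2 := hbd q hqmem
    simp only [List.length_set]
    omega

theorem inv_backward {li : List Char} {q B idx : Int} {rest : List Int}
    (hInv : nohInv li (q :: rest) idx) (hB : (q :: rest).getLast? = some B) :
    nohInv (li.set B.toNat 'A') ((q :: rest).dropLast) (B - (li.length : Int)) := by
  obtain ⟨hne, hpw, hbd, hH, hhd, hlast⟩ := hInv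
  have hBmem : B ∈ q :: rest := List.mem_of_getLast? hB
  obtain ⟨hBlt, hBcast⟩ := nohInv_elim_pos hbd hBmem
  have hltlast := pw_lt_last_of_mem_dropLast hpw hB
  have hcat := pw_dropLast_concat (List.cons_ne_nil q rest) hB
  have hsub : ∀ x ∈ (q :: rest).dropLast, x ∈ q :: rest := fun x hx => List.dropLast_subset _ hx
  refine ⟨?_, hpw.sublist (List.dropLast_sublist _), ?_, ?_, ?_, ?_⟩
  · intro h
    exact hne (by simpa using congrArg List.length h)
  · intro x hx
    have := hbd x (hsub x hx)
    simpa [List.length_set] using this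
  · intro j hj
    have hj' : j < li.length := by simpa [List.length_set] using hj
    rw [List.getElem_set]
    by_cases he : B.toNat = j
    · subst he
      simp only [if_pos rfl]
      constructor
      · intro h; exact absurd rfl h
      · intro h
        rw [hBcast] at h
        exact absurd (hltlast B h) (lt_irrefl B)
    · rw [if_neg he]
      rw [hH j hj']
      have hmm : ∀ x : Int, x ∈ q :: rest ↔ x ∈ (q :: rest).dropLast ∨ x = B := by
        intro x
        conv_lhs => rw [← hcat]
        simp [List.mem_append]
      rw [hmm]
      constructor
      · intro h
        rcases h with hc | hc
        · exact hc
        · exact absurd (by omega : B.toNat = j) he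
      · exact Or.inl
  · intro x hx
    have h1 := hbd x (hsub x (List.mem_of_mem_head? hx))
    have h2 := hbd B hBmem
    omega
  · intro x hx
    have hx' := List.mem_of_getLast? hx
    have := hltlast x hx'
    simp only [List.length_set]
    omega

theorem noh_main : ∀ (fuel : Nat) (mid : List Int) (li : List Char) (idx num : Int),
    mid.length < fuel → nohInv li mid idx →
    nohLoop fuel li idx num = nohAltGo (li.length : Int) mid.length mid idx num := by
  intro fuel
  induction fuel with
  | zero => intro mid li idx num h; omega
  | succ fuel ih =>
    intro mid li idx num hfuel hInv
    have hlen1 : 0 < li.length := List.length_pos_iff.mpr hInv.1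
    cases mid with
    | nil =>
      rw [nohLoop]
      rw [noh_scan_nil hInv num (li.length - 1) 1]
      rw [if_pos ((allA_iff hInv).mpr rfl)]
      rfl
    | cons q rest =>
      obtain ⟨B, hB⟩ : ∃ B, (q :: rest).getLast? = some B :=
        ⟨(q :: rest).getLast (List.cons_ne_nil q rest), List.getLast?_eq_some_getLast _⟩
      have hq : (q :: rest).head? = some q := rfl
      have hidxq : idx < q := hInv.2.2.2.2.1 q hq
      have hBidx : B - (li.length : Int) < idx := hInv.2.2.2.2.2 B hB
      have hscan := noh_scan num hInv hq hB (li.length - 1) 1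
        (by omega) le_rfl (by omega) (by omega)
      have hBeq : (q :: rest).getLast (List.cons_ne_nil q rest) = B := by
        have h2 := List.getLast?_eq_some_getLast (l := q :: rest) (List.cons_ne_nil q rest)
        rw [h2] at hB
        injection hB
      rw [show (q :: rest).length = rest.length + 1 from List.length_cons]
      rw [nohLoop, nohAltGo]
      simp only [hBeq]
      by_cases hc : q - idx ≤ idx - (B - (li.length : Int))
      · rw [if_pos hc] at hscan
        simp only [hscan]
        have hInv' := inv_forward hInv
        rw [if_pos hc]
        by_cases hr : rest = []
        · subst hr
          rw [if_pos ((allA_iff hInv').mpr rfl)]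
          rfl
        · rw [if_neg (by rw [allA_iff hInv']; exact hr)]
          have := ih rest (li.set q.toNat 'A') q (num + (q - idx))
            (by simp only [List.length_cons] at hfuel; omega) hInv'
          rw [this, List.length_set]
      · rw [if_neg hc] at hscan
        simp only [hscan]
        have hInv' := inv_backward hInv hB
        rw [if_neg hc]
        by_cases hr : (q :: rest).dropLast = []
        · rw [if_pos (by rw [allA_iff hInv', hr])]
          rw [show rest.length = ((q :: rest).dropLast).length by simp]
          rw [hr]
          rfl
        · rw [if_neg (by rw [allA_iff hInv']; exact hr)]
          have := ih ((q :: rest).dropLast) (li.set B.toNat 'A') (B - (li.length : Int))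
            (num + (idx - (B - (li.length : Int))))
            (by simp only [List.length_cons] at hfuel; simp; omega) hInv'
          rw [this, List.length_set]
          rw [show rest.length = ((q :: rest).dropLast).length by simp]

-- ===== VERDICT (by name: the statement is the Claim_ definition above) =====
theorem number_of_horizontal_spec : Claim_equal_number_of_horizontal := by
  intro name _ hpre
  unfold Spec_number_of_horizontal number_of_horizontal number_of_horizontal_alt
  have hne : name.toList ≠ [] := by
    intro h
    exact hpre (by simpa using congrArg String.ofList h)
  have hlen : 0 < name.toList.length := List.length_pos_iff.mpr hne
  simp only [pySet_pos name.toList 0 'A' le_rfl (by exact_mod_cast hlen)]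
  have hInv0 : nohInv (name.toList.set (0 : Int).toNat 'A')
      ((PySem.List.pyRange 1 (name.toList.length : Int) 1).filter
        (fun i => PySem.List.pyGetD name.toList i 'A' ≠ 'A')) 0 := by
    refine ⟨?_, ?_, ?_, ?_, ?_, ?_⟩
    · intro h
      exact hne (by simpa using congrArg List.length h)
    · exact (PySem.List.pairwise_lt_pyRange_one 1 (name.toList.length : Int)).filter _
    · intro x hx
      have := PySem.List.mem_pyRange_one.mp (List.mem_of_mem_filter hx)
      simpa [List.length_set] using this
    · intro j hj
      have hj' : j < name.toList.length := by simpa [List.length_set] using hj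
      rw [List.getElem_set]
      by_cases he : (0 : Int).toNat = j
      · rw [if_pos he]
        constructor
        · intro h; exact absurd rfl h
        · intro h
          have := PySem.List.mem_pyRange_one.mp (List.mem_of_mem_filter h)
          omega
      · rw [if_neg he]
        rw [List.mem_filter]
        have hj0 : 0 < j := by omega
        constructor
        · intro h
          refine ⟨PySem.List.mem_pyRange_one.mpr (by omega), ?_⟩
          simp only [PySem.List.pyGetD_natCast, List.getD_eq_getElem?_getD,
            List.getElem?_eq_getElem hj', Option.getD_some]
          simpa using h
        · rintro ⟨-, h⟩
          simp only [PySem.List.pyGetD_natCast, List.getD_eq_getElem?_getD,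
            List.getElem?_eq_getElem hj', Option.getD_some] at h
          simpa using h
    · intro x hx
      have := PySem.List.mem_pyRange_one.mp
        (List.mem_of_mem_filter (List.mem_of_mem_head? hx))
      omega
    · intro x hx
      have := PySem.List.mem_pyRange_one.mp
        (List.mem_of_mem_filter (List.mem_of_getLast? hx))
      simp only [List.length_set]
      omega
  have hcount : ((PySem.List.pyRange 1 (name.toList.length : Int) 1).filter
      (fun i => PySem.List.pyGetD name.toList i 'A' ≠ 'A')).length < name.toList.length := by
    have h1 := List.length_filter_le
      (fun i => decide (PySem.List.pyGetD name.toList i 'A' ≠ 'A'))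
      (PySem.List.pyRange 1 (name.toList.length : Int) 1)
    have h2 := PySem.List.length_pyRange_one 1 (name.toList.length : Int)
    omega
  have hmain := noh_main ((name.toList.set (0 : Int).toNat 'A').length)
    ((PySem.List.pyRange 1 (name.toList.length : Int) 1).filter
      (fun i => PySem.List.pyGetD name.toList i 'A' ≠ 'A'))
    (name.toList.set (0 : Int).toNat 'A') 0 0
    (by simpa [List.length_set] using hcount) hInv0
  rw [hmain, List.length_set]

@[simp] theorem number_of_horizontal_raises : Claim_raises_number_of_horizontal := by
  unfold Claim_raises_number_of_horizontal
  exact ⟨fun name _ h hp => hp h, by decide⟩
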